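-- pv_equiv track=rewrite | github.com/Sante-cyber/python | bolling_band_back_test_look_the_best_volum+RSI+opitimation-GBPNZDV2.2.py | count_signal_buy
-- ===== SOURCE A (Python) =====
-- def count_signal_buy(df, column_name):
--     buy_counts = []  # List to store counts for each row
--     count = 0  # Initialize count of consecutive rows
--     for value in df[column_name]:  # Iterate over values in the specific column
--         if value =='buy':  # If the value is lower than 30
--             count += 1  # Increment the count of consecutive rows
--         else:
--             count = 0  # Reset the count if the value is not greater than 30
--         buy_counts.append(count)  # Append the count for the current row
--     return buy_counts
-- ===== SOURCE B (Python) =====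
-- from itertools import groupby
--
-- def count_signal_buy(df, column_name):
--     out = []
--     for value, run in groupby(df[column_name]):
--         n = sum(1 for _ in run)
--         if value == 'buy':
--             out.extend(range(1, n + 1))
--         else:
--             out.extend([0] * n)
--     return out
-- ===== Notes on version B (the rewrite author's own statement) =====
-- stated objective: alternative
-- what changed: Replaced the running-counter loop over rows with itertools.groupby over consecutive runs: each 'buy' run emits range(1, n+1) and every other run emits n zeros, segments concatenated.
import Mathlib
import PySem

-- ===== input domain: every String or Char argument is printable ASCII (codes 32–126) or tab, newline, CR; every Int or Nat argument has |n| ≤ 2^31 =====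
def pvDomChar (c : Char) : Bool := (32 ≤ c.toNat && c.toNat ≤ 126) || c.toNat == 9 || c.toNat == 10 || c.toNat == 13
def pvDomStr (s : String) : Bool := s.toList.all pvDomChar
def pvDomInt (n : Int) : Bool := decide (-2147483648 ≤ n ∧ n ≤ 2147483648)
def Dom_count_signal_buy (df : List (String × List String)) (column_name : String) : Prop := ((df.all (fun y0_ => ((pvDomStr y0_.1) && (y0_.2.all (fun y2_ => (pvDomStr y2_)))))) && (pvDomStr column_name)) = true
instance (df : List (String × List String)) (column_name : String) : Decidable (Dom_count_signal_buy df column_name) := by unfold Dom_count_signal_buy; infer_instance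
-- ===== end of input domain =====

-- B changes the decomposition (per-run segments via groupby instead of a running counter); return value only, no mutation.
-- ===== PORT A =====
-- A: single pass keeping a running count that resets on non-'buy', appending it per row.
def count_signal_buy (df : List (String × List String)) (column_name : String) : List Int :=
  match (PySem.Dict.mk df).get? column_name with
  | none => []   -- Python raises KeyError here; excluded by Pre_
  | some col =>
    (col.foldl (fun (s : List Int × Int) value =>
        let count := if value == "buy" then s.2 + 1 else 0
        (s.1 ++ [count], count)) ([], 0)).1

-- ===== PORT B =====
-- take the leading run of elements equal to x (its length, and the remainder)
def pvTakeRun (x : String) : List String → Nat × List String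
  | [] => (0, [])
  | y :: ys => if y == x then ((pvTakeRun x ys).1 + 1, (pvTakeRun x ys).2) else (0, y :: ys)

theorem pvTakeRun_len (x : String) : ∀ ys : List String, (pvTakeRun x ys).2.length ≤ ys.length := by
  intro ys; induction ys with
  | nil => simp [pvTakeRun]
  | cons y ys ih =>
    by_cases h : (y == x) = true <;> simp [pvTakeRun, h] <;> omega

-- groupby: for each maximal run, emit range(1, n+1) for a 'buy' run, n zeros otherwise
def pvGo : List String → List Int
  | [] => []
  | x :: xs =>
    let p := pvTakeRun x xs
    (if x == "buy" then PySem.List.pyRange 1 ((p.1 : Int) + 2) 1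
     else List.replicate (p.1 + 1) (0 : Int)) ++ pvGo p.2
termination_by l => l.length
decreasing_by
  have := pvTakeRun_len x xs; simp; omega

def count_signal_buy_alt (df : List (String × List String)) (column_name : String) : List Int :=
  match (PySem.Dict.mk df).get? column_name with
  | none => []   -- Python raises KeyError here; excluded by Pre_
  | some col => pvGo col

-- ===== PRECONDITION & SPEC =====
-- Pre_ excludes exactly the inputs where df[column_name] raises KeyError (both A and B raise there).
def Pre_count_signal_buy (df : List (String × List String)) (column_name : String) : Prop :=
  (df.any (fun p => p.1 == column_name)) = true
instance (df : List (String × List String)) (column_name : String) : Decidable (Pre_count_signal_buy df column_name) := by unfold Pre_count_signal_buy; infer_instance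

def pvWitness_count_signal_buy : (List (String × List String)) × String :=
  ([("c", ["buy", "buy", "sell", "buy"])], "c")

def Spec_count_signal_buy (df : List (String × List String)) (column_name : String) (out : List Int) : Prop := out = count_signal_buy_alt df column_name
instance (df : List (String × List String)) (column_name : String) (out : List Int) : Decidable (Spec_count_signal_buy df column_name out) := by unfold Spec_count_signal_buy; infer_instance

-- ===== CLAIM (what is proved, stated in full; the proofs are below) =====
def Claim_equal_count_signal_buy : Prop := ∀ (df : List (String × List String)) (column_name : String), Dom_count_signal_buy df column_name → Pre_count_signal_buy df column_name → Spec_count_signal_buy df column_name (count_signal_buy df column_name)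

-- ===== LEMMAS AND PROOFS =====

-- A's loop without the accumulated output list
def pvLoopA (c : Int) : List String → List Int
  | [] => []
  | v :: vs =>
    let c' := if v == "buy" then c + 1 else 0
    c' :: pvLoopA c' vs

theorem pvFoldl_eq (l : List String) : ∀ (acc : List Int) (c : Int),
    (l.foldl (fun (s : List Int × Int) value =>
        let count := if value == "buy" then s.2 + 1 else 0
        (s.1 ++ [count], count)) (acc, c)).1 = acc ++ pvLoopA c l := by
  induction l with
  | nil => simp [pvLoopA]
  | cons v vs ih =>
    intro acc c
    simp only [List.foldl_cons]
    rw [ih]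
    simp [pvLoopA]

theorem pvTakeRun_split (x : String) : ∀ xs : List String,
    xs = List.replicate (pvTakeRun x xs).1 x ++ (pvTakeRun x xs).2 ∧
    ((pvTakeRun x xs).2 = [] ∨ ∃ y ys, (pvTakeRun x xs).2 = y :: ys ∧ (y == x) = false) := by
  intro xs; induction xs with
  | nil => simp [pvTakeRun]
  | cons y ys ih =>
    by_cases h : (y == x) = true
    · have hx : y = x := by simpa using h
      refine ⟨?_, ?_⟩
      · simp [pvTakeRun, h, List.replicate_succ, hx]; exact ih.1
      · simpa [pvTakeRun, h] using ih.2
    · simp only [pvTakeRun, h, if_neg]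
      exact ⟨by simp, Or.inr ⟨y, ys, rfl, by simpa using h⟩⟩

theorem pvLoopA_reset (c : Int) (rest : List String)
    (h : rest = [] ∨ ∃ y ys, rest = y :: ys ∧ (y == "buy") = false) :
    pvLoopA c rest = pvLoopA 0 rest := by
  rcases h with h | ⟨y, ys, rfl, hy⟩
  · simp [h, pvLoopA]
  · simp [pvLoopA, hy]

theorem pvLoopA_rep_buy : ∀ (n : Nat) (c : Int) (rest : List String),
    pvLoopA c (List.replicate n "buy" ++ rest) =
      PySem.List.pyRange (c + 1) (c + 1 + n) 1 ++ pvLoopA (c + n) rest := by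
  intro n; induction n with
  | zero => intro c rest; simp [PySem.List.pyRange_one_eq_nil]
  | succ n ih =>
    intro c rest
    rw [PySem.List.pyRange_one_cons (a := c + 1) (b := c + 1 + ((n : Nat) + 1 : Nat)) (by push_cast; omega)]
    simp only [List.replicate_succ, List.cons_append, pvLoopA]
    simp only [show (("buy" : String) == "buy") = true from by decide, if_pos]
    rw [ih (c + 1) rest]
    push_cast
    ring_nf

theorem pvLoopA_rep_other : ∀ (n : Nat) (x : String) (rest : List String),
    (x == "buy") = false →
    pvLoopA 0 (List.replicate n x ++ rest) = List.replicate n (0 : Int) ++ pvLoopA 0 rest := by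
  intro n; induction n with
  | zero => intro x rest _; simp
  | succ n ih =>
    intro x rest hx
    simp only [List.replicate_succ, List.cons_append, pvLoopA, hx, if_neg, Bool.false_eq_true,
      not_false_iff]
    rw [ih x rest hx]

theorem pvLoopA_eq_pvGo_aux : ∀ (n : Nat) (l : List String), l.length ≤ n → pvLoopA 0 l = pvGo l := by
  intro n
  induction n with
  | zero =>
    intro l hl
    have : l = [] := by cases l <;> simp_all
    simp [this, pvLoopA, pvGo]
  | succ n ih =>
    intro l hl
    cases l with
    | nil => simp [pvLoopA, pvGo]
    | cons x xs =>
      obtain ⟨hsplit, hhead⟩ := pvTakeRun_split x xs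
      have hlen := pvTakeRun_len x xs
      have ihrest : pvLoopA 0 (pvTakeRun x xs).2 = pvGo (pvTakeRun x xs).2 := by
        apply ih
        simp only [List.length_cons] at hl
        omega
      rw [pvGo]
      by_cases hx : (x == "buy") = true
      · have hx' : x = "buy" := by simpa using hx
        have hcons : x :: xs = List.replicate ((pvTakeRun x xs).1 + 1) "buy" ++ (pvTakeRun x xs).2 := by
          rw [List.replicate_succ, List.cons_append, ← hx']
          exact congrArg (x :: ·) hsplit
        rw [hcons, pvLoopA_rep_buy ((pvTakeRun x xs).1 + 1) 0 (pvTakeRun x xs).2]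
        have hreset : pvLoopA ((0 : Int) + (↑((pvTakeRun x xs).1 + 1) : Int)) (pvTakeRun x xs).2 =
            pvLoopA 0 (pvTakeRun x xs).2 := by
          apply pvLoopA_reset
          rcases hhead with h | ⟨y, ys, h1, h2⟩
          · exact Or.inl h
          · exact Or.inr ⟨y, ys, h1, by rw [hx'] at h2; exact h2⟩
        rw [hreset, ihrest]
        simp only [hx, if_pos]
        congr 2 <;> push_cast <;> omega
      · have hx' : (x == "buy") = false := by simpa using hx
        have hcons : x :: xs = List.replicate ((pvTakeRun x xs).1 + 1) x ++ (pvTakeRun x xs).2 := by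
          rw [List.replicate_succ, List.cons_append]
          exact congrArg (x :: ·) hsplit
        rw [hcons, pvLoopA_rep_other ((pvTakeRun x xs).1 + 1) x (pvTakeRun x xs).2 hx', ihrest]
        simp [hx']

theorem pvLoopA_eq_pvGo (l : List String) : pvLoopA 0 l = pvGo l :=
  pvLoopA_eq_pvGo_aux l.length l le_rfl

-- ===== VERDICT (by name: the statement is the Claim_ definition above) =====
theorem count_signal_buy_spec : Claim_equal_count_signal_buy := by
  unfold Claim_equal_count_signal_buy
  intro df column_name _ _
  unfold Spec_count_signal_buy count_signal_buy count_signal_buy_alt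
  cases h : (PySem.Dict.mk df).get? column_name with
  | none => rfl
  | some col => simpa using (pvFoldl_eq col [] 0).trans (by simpa using pvLoopA_eq_pvGo col)
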